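-- pv_equiv track=rewrite | github.com/Olesya129/Information_Processing_Theory | Hamming.py | remove_parity_bits
-- ===== SOURCE A (Python) =====
-- def remove_parity_bits(data):
--     n = len(data)   # Получаем длину данных
--     result = []     # Создаём список для информационных битов
--     i = 0
--     for j in range(n):  # Перебираем все биты
--         if j + 1 != 2 ** i:         # Если позиция не контрольная (не 1, 2, 4, ...)
--             result.append(data[j])  # Добавляем информационный бит
--         else:
--             i += 1
--     return ''.join(result)
-- ===== SOURCE B (Python) =====
-- def remove_parity_bits(data):
--     n = len(data)
--     parts = []
--     i = 1
--     while 2 ** i < n: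
--         parts.append(data[2 ** i : 2 ** (i + 1) - 1])
--         i += 1
--     return ''.join(parts)
-- ===== Notes on version B (the rewrite author's own statement) =====
-- stated objective: faster
-- what changed: Instead of scanning every bit and testing each index against the next power of two, B appends the contiguous slices of data lying strictly between consecutive power-of-two positions, looping only O(log n) times with O(1)-amortized slice copies.
import Mathlib
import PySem

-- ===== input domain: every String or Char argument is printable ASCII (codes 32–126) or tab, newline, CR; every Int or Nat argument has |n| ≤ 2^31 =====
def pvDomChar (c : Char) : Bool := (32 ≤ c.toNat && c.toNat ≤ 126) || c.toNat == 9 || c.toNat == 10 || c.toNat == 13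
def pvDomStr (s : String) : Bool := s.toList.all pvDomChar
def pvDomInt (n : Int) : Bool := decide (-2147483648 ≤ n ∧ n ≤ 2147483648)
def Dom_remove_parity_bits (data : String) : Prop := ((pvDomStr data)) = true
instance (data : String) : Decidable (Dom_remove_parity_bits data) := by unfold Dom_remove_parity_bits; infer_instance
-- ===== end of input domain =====

-- B replaces A's per-bit scan (testing every index against the next power of two) by
-- appending the contiguous slices between consecutive power-of-two positions (objective: faster).


-- ===== PORT A =====
-- the body of A's for-loop: state (i, result); append data[j] unless j+1 == 2**i, else i += 1
def aStep (cs : List Char) (s : Nat × List Char) (j : Int) : Nat × List Char :=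
  if j + 1 ≠ (2:Int) ^ s.1 then (s.1, s.2 ++ [PySem.List.pyGetD cs j ' '])
  else (s.1 + 1, s.2)

def remove_parity_bits (data : String) : String :=
  let cs := data.toList
  let n : Int := cs.length
  String.ofList ((PySem.List.pyRange 0 n 1).foldl (aStep cs) (0, [])).2

-- ===== PORT B =====
-- B's while-loop: while 2**i < n, append the slice data[2**i : 2**(i+1)-1]
def altBlocks (cs : List Char) (n : Nat) (i : Nat) : List Char :=
  if 2 ^ i < n then
    PySem.List.slice cs (some ((2:Int) ^ i)) (some ((2:Int) ^ (i + 1) - 1))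
      ++ altBlocks cs n (i + 1)
  else []
termination_by n - i
decreasing_by
  have h2 : i < 2 ^ i := Nat.lt_two_pow_self
  omega

def remove_parity_bits_alt (data : String) : String :=
  let cs := data.toList
  String.ofList (altBlocks cs cs.length 1)

-- ===== PRECONDITION & SPEC =====
def Spec_remove_parity_bits (data : String) (out : String) : Prop := out = remove_parity_bits_alt data
instance (data : String) (out : String) : Decidable (Spec_remove_parity_bits data out) := by unfold Spec_remove_parity_bits; infer_instance

-- ===== CLAIM (what is proved, stated in full; the proofs are below) =====
def Claim_equal_remove_parity_bits : Prop := ∀ (data : String), Dom_remove_parity_bits data → Spec_remove_parity_bits data (remove_parity_bits data)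

-- ===== LEMMAS AND PROOFS =====

-- a run of A's loop over indices none of which sits just before a power of two only appends
lemma fold_nopow (cs : List Char) (I : Nat) (L : List Int)
    (h : ∀ j ∈ L, j + 1 ≠ (2:Int) ^ I) (acc : List Char) :
    L.foldl (aStep cs) (I, acc)
      = (I, acc ++ L.map (fun j => PySem.List.pyGetD cs j ' ')) := by
  induction L generalizing acc with
  | nil => simp
  | cons x xs ih =>
    have hx := h x (by simp)
    simp [aStep, hx, ih (fun j hj => h j (by simp [hj]))]

-- the characters A collects over a sub-range of indices are the corresponding segment of the data
lemma map_pyGetD_range_take (cs : List Char) (a b : Nat) (hb : b ≤ cs.length) :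
    (PySem.List.pyRange (a:Int) (b:Int) 1).map (fun j => PySem.List.pyGetD cs j ' ')
      = (cs.drop a).take (b - a) := by
  by_cases hab : a ≤ b
  · have hlen_eq : PySem.List.len cs = (cs.length:Int) := by simp [PySem.List.len]
    have hfull := PySem.List.map_pyGetD_pyRange cs ' ' (a := (a:Int)) (Int.natCast_nonneg a)
    rw [hlen_eq] at hfull
    rw [PySem.List.pyRange_one_append (a:Int) (b:Int) (cs.length:Int)
        (by exact_mod_cast hab) (by exact_mod_cast hb), List.map_append] at hfull
    have hl : ((PySem.List.pyRange (a:Int) (b:Int) 1).map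
        (fun j => PySem.List.pyGetD cs j ' ')).length = b - a := by
      rw [List.length_map, PySem.List.length_pyRange_one]; omega
    have htake := List.take_left' hl
      (l₂ := (PySem.List.pyRange (b:Int) (cs.length:Int) 1).map
        (fun j => PySem.List.pyGetD cs j ' '))
    rw [hfull] at htake
    simpa using htake.symm
  · rw [PySem.List.pyRange_one_eq_nil (by exact_mod_cast Nat.le_of_not_le hab : (b:Int) ≤ (a:Int))]
    have : b - a = 0 := by omega
    simp [this]

-- main block correspondence: A's loop resumed at index 2^k with counter k+1
-- produces exactly B's blocks from k onwards
lemma block_lemma (cs : List Char) (k : Nat) (acc : List Char) :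
    ((PySem.List.pyRange ((2:Int)^k) (cs.length:Int) 1).foldl (aStep cs) (k + 1, acc)).2
      = acc ++ altBlocks cs cs.length k := by
  have hk1 : k < 2 ^ k := Nat.lt_two_pow_self
  have eN1 : (2:Nat)^(k+1) = 2 * 2^k := by ring
  have ek : (2:Int)^k = ((2^k : Nat) : Int) := by push_cast; ring
  have ek1 : (2:Int)^(k+1) = ((2^(k+1) - 1 : Nat) : Int) + 1 := by push_cast [eN1]; omega
  rw [ek]
  by_cases hlt : 2 ^ k < cs.length
  · by_cases hnext : 2 ^ (k+1) ≤ cs.length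
    · -- full block [2^k, 2^(k+1)-1), then the parity index 2^(k+1)-1, then recurse
      have hsplit1 := PySem.List.pyRange_one_append ((2^k:Nat):Int) ((2^(k+1) - 1:Nat):Int)
        (cs.length:Int) (by omega) (by omega)
      have hsplit2 := PySem.List.pyRange_one_cons
        (a := ((2^(k+1) - 1:Nat):Int)) (b := (cs.length:Int)) (by omega)
      have hagree : ∀ j ∈ PySem.List.pyRange ((2^k:Nat):Int) ((2^(k+1) - 1:Nat):Int) 1,
          j + 1 ≠ (2:Int) ^ (k + 1) := by
        intro j hj
        rw [PySem.List.mem_pyRange_one] at hj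
        rw [ek1]; omega
      rw [hsplit1, hsplit2, List.foldl_append, fold_nopow cs (k+1) _ hagree acc]
      simp only [List.foldl_cons]
      have hstep : ∀ acc' : List Char,
          aStep cs (k+1, acc') (((2^(k+1) - 1:Nat):Int)) = (k+2, acc') := by
        intro acc'; simp only [aStep]; rw [if_neg (not_not_intro ek1.symm)]
      rw [hstep]
      have ih := block_lemma cs (k+1)
        (acc ++ (PySem.List.pyRange ((2^k:Nat):Int) ((2^(k+1) - 1:Nat):Int) 1).map
          (fun j => PySem.List.pyGetD cs j ' '))
      have ek1' : (2:Int)^(k+1) = ((2^(k+1) - 1 : Nat) : Int) + 1 := ek1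
      rw [ek1'] at ih
      rw [ih]
      conv_rhs => rw [altBlocks]
      rw [if_pos hlt]
      have hmap := map_pyGetD_range_take cs (2^k) (2^(k+1) - 1) (by omega)
      have hslice : PySem.List.slice cs (some ((2:Int)^k)) (some ((2:Int)^(k+1) - 1))
          = (cs.drop (2^k)).take (2^(k+1) - 1 - 2^k) := by
        rw [show (2:Int)^(k+1) - 1 = ((2^(k+1) - 1 : Nat) : Int) by rw [ek1]; ring, ek,
            PySem.List.slice_toNat cs (Int.natCast_nonneg _) (Int.natCast_nonneg _)]
        simp only [Int.toNat_natCast]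
      rw [hmap, hslice, List.append_assoc]
    · -- partial last block: the data ends before the next parity position
      have hagree : ∀ j ∈ PySem.List.pyRange ((2^k:Nat):Int) (cs.length:Int) 1,
          j + 1 ≠ (2:Int) ^ (k + 1) := by
        intro j hj
        rw [PySem.List.mem_pyRange_one] at hj
        rw [ek1]; omega
      rw [fold_nopow cs (k+1) _ hagree acc]
      rw [altBlocks]
      rw [if_pos hlt]
      conv_rhs => rw [altBlocks]
      rw [if_neg (by omega : ¬ (2 ^ (k+1) < cs.length)), List.append_nil]
      have hmap := map_pyGetD_range_take cs (2^k) cs.length (le_refl _)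
      have hslice : PySem.List.slice cs (some ((2:Int)^k)) (some ((2:Int)^(k+1) - 1))
          = (cs.drop (2^k)).take (cs.length - 2^k) := by
        rw [show (2:Int)^(k+1) - 1 = ((2^(k+1) - 1 : Nat) : Int) by rw [ek1]; ring, ek,
            PySem.List.slice_toNat cs (Int.natCast_nonneg _) (Int.natCast_nonneg _)]
        simp only [Int.toNat_natCast]
        have hdlen : (cs.drop (2^k)).length = cs.length - 2^k := by simp
        rw [List.take_of_length_le (by omega), List.take_of_length_le (by omega)]
      rw [hmap, hslice]
  · rw [PySem.List.pyRange_one_eq_nil (by omega)]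
    rw [altBlocks]
    simp [hlt]
termination_by cs.length - 2 ^ k
decreasing_by
  omega

-- the whole programs, at the level of character lists
lemma main_list (cs : List Char) :
    ((PySem.List.pyRange 0 (cs.length:Int) 1).foldl (aStep cs) (0, [])).2
      = altBlocks cs cs.length 1 := by
  match hn : cs.length with
  | 0 =>
    rw [show ((0:Nat):Int) = (0:Int) by norm_num,
        PySem.List.pyRange_one_eq_nil (by norm_num)]
    rw [altBlocks]; simp
  | 1 =>
    rw [show ((1:Nat):Int) = (1:Int) by norm_num,
        PySem.List.pyRange_one_cons (by norm_num : (0:Int) < 1),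
        PySem.List.pyRange_one_eq_nil (by norm_num)]
    simp only [List.foldl_cons, List.foldl_nil]
    rw [show aStep cs (0, []) 0 = (1, []) by simp [aStep]]
    rw [altBlocks]; simp
  | (m + 2) =>
    have h0 : (0:Int) < ((m + 2 : Nat):Int) := by push_cast; omega
    have h1 : (0:Int) + 1 < ((m + 2 : Nat):Int) := by push_cast; omega
    rw [PySem.List.pyRange_one_cons h0, PySem.List.pyRange_one_cons h1]
    simp only [List.foldl_cons]
    rw [show aStep cs (0, []) 0 = (1, []) by simp [aStep],
        show aStep cs (1, []) (0 + 1) = (2, []) by simp [aStep]]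
    have hb := block_lemma cs 1 []
    rw [hn] at hb
    rw [show ((0:Int) + 1 + 1) = (2:Int)^1 by norm_num]
    simpa using hb

-- ===== VERDICT (by name: the statement is the Claim_ definition above) =====
theorem remove_parity_bits_spec : Claim_equal_remove_parity_bits := by
  intro data _
  show String.ofList ((PySem.List.pyRange 0 (data.toList.length:Int) 1).foldl
      (aStep data.toList) (0, [])).2
    = String.ofList (altBlocks data.toList data.toList.length 1)
  exact congrArg String.ofList (main_list data.toList)
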